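-- pv_equiv track=rewrite | github.com/james5635/GeekForGeek-Data-Structure-and-Algorithm | string/lexicographic_rank.py | findRankOptimized
-- ===== SOURCE A (Python) =====
-- def fact(n):
--     """Calculate factorial of n"""
--     res = 1
--     for i in range(2, n + 1):
--         res *= i
--     return res
--
-- def findRankOptimized(s):
--     """
--     Find lexicographic rank using frequency array - O(n) time
--     """
--     n = len(s)
--     mul = fact(n)
--     rank = 1
--
--     # Using a vector of size 26 for lowercase letters
--     count = [0] * 26
--
--     # Populate the count array for each character in string
--     for i in range(n):
--         count[ord(s[i]) - ord("a")] += 1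
--
--     # Convert count to cumulative sum
--     for i in range(1, 26):
--         count[i] += count[i - 1]
--
--     for i in range(n):
--         mul //= n - i
--
--         # Get index of current character in count array
--         charIndex = ord(s[i]) - ord("a")
--
--         # Add count of characters smaller than current character
--         if charIndex > 0:
--             rank += count[charIndex - 1] * mul
--
--         # Update count array
--         for j in range(charIndex, 26):
--             count[j] -= 1
--
--     return rank
-- ===== SOURCE B (Python) =====
-- def _factorial(k):
--     """k! by simple recursion."""
--     return 1 if k <= 1 else k * _factorial(k - 1)
--
-- def findRankOptimized(s):
--     """
--     Find lexicographic rank by direct suffix scanning: for each position i,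
--     count the characters after i that are smaller than s[i] and weight the
--     count by the factorial of the remaining length. No count array is built.
--     """
--     n = len(s)
--     rank = 1
--     for i in range(n):
--         smaller = 0
--         for j in range(i + 1, n):
--             if s[j] < s[i]:
--                 smaller += 1
--         rank += smaller * _factorial(n - 1 - i)
--     return rank
-- ===== Notes on version B (the rewrite author's own statement) =====
-- stated objective: simpler
-- what changed: Replaces the 26-entry cumulative frequency array (built, prefix-summed, then decremented in place each step) with a direct per-position rescan of the suffix counting smaller characters, weighted by a freshly computed factorial.
-- intended difference: On strings of length >= 2 containing a character in 'G'..'`', A misindexes its 26-slot count array through Python negative-index wraparound and returns a meaningless number (0 on 'a`b'), while B returns the comparison-based lexicographic rank (3 on 'a`b'), the intended value. — e.g. on findRankOptimized("a`b"): A returns 0, B returns 3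
import Mathlib
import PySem

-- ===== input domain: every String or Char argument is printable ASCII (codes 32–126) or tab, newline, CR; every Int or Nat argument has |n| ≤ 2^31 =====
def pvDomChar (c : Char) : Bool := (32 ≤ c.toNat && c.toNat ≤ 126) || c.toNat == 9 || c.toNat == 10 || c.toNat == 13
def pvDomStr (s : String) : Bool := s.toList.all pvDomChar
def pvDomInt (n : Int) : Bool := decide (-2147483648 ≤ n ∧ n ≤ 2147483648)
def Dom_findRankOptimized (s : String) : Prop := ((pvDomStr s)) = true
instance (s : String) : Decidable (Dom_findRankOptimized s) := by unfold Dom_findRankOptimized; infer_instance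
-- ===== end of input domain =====

-- B replaces A's cumulative 26-slot frequency array with a direct per-position rescan of the
-- suffix (count of smaller characters times a freshly computed factorial): simpler, no faster.

-- ===== PORT A =====
-- helper `fact` of A: res = 1; for i in range(2, n+1): res *= i
def factA (n : Int) : Int :=
  (PySem.List.pyRange 2 (n + 1) 1).foldl (fun res i => res * i) 1

def findRankOptimized (s : String) : Int :=
  let cs := s.toList
  let n : Int := PySem.List.len cs
  let mul := factA n
  let count : List Int := List.replicate 26 0
  -- for i in range(n): count[ord(s[i]) - ord("a")] += 1
  let count := (PySem.List.pyRange 0 n 1).foldl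
    (fun cnt i =>
      let ci : Int := ((PySem.List.pyGetD cs i ' ').toNat : Int) - 97
      PySem.List.pySetD cnt ci (PySem.List.pyGetD cnt ci 0 + 1)) count
  -- for i in range(1, 26): count[i] += count[i-1]
  let count := (PySem.List.pyRange 1 26 1).foldl
    (fun cnt i =>
      PySem.List.pySetD cnt i (PySem.List.pyGetD cnt i 0 + PySem.List.pyGetD cnt (i - 1) 0)) count
  -- main loop over i in range(n), state (mul, rank, count)
  let st := (PySem.List.pyRange 0 n 1).foldl
    (fun (st : Int × Int × List Int) i =>
      let mul := PySem.Int.floordiv st.1 (n - i)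
      let charIndex : Int := ((PySem.List.pyGetD cs i ' ').toNat : Int) - 97
      let rank := if charIndex > 0
        then st.2.1 + PySem.List.pyGetD st.2.2 (charIndex - 1) 0 * mul
        else st.2.1
      let cnt := (PySem.List.pyRange charIndex 26 1).foldl
        (fun c j => PySem.List.pySetD c j (PySem.List.pyGetD c j 0 - 1)) st.2.2
      (mul, rank, cnt)) (mul, 1, count)
  st.2.1

-- ===== PORT B =====
-- helper `_factorial` of B: 1 if k <= 1 else k * _factorial(k-1)
def factB (k : Int) : Int :=
  if k ≤ 1 then 1 else k * factB (k - 1)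
termination_by k.toNat
decreasing_by omega

def findRankOptimized_alt (s : String) : Int :=
  let cs := s.toList
  let n : Int := PySem.List.len cs
  (PySem.List.pyRange 0 n 1).foldl
    (fun rank i =>
      let smaller := (PySem.List.pyRange (i + 1) n 1).foldl
        (fun sm j =>
          if PySem.List.pyGetD cs j ' ' < PySem.List.pyGetD cs i ' ' then sm + 1 else sm)
        (0 : Int)
      rank + smaller * factB (n - 1 - i)) 1

-- ===== PRECONDITION & SPEC =====
-- Pre_ admits exactly the strings on which A returns: every character in 'G'..'z' (code 71..122);
-- on any other character A raises IndexError (the 26-slot array is indexed with ord(c)-ord('a')).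
def Pre_findRankOptimized (s : String) : Prop :=
  (s.toList.all (fun c => 71 ≤ c.toNat && c.toNat ≤ 122)) = true
instance (s : String) : Decidable (Pre_findRankOptimized s) := by
  unfold Pre_findRankOptimized; infer_instance

def pvWitness_findRankOptimized : String := "string"

-- On strings of length ≥ 2 containing a non-lowercase character in 'G'..'`' (code 71..96), A
-- silently misindexes its 26-slot array through Python's negative-index wraparound and returns a
-- meaningless number (e.g. 0 on 'a`b'), while B returns the comparison-based lexicographic rank
-- (3 on 'a`b'), the intended value.
def D_findRankOptimized (s : String) : Prop :=
  2 ≤ s.toList.length ∧ (s.toList.any (fun c => c.toNat ≤ 96)) = true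
instance (s : String) : Decidable (D_findRankOptimized s) := by
  unfold D_findRankOptimized; infer_instance

def Spec_findRankOptimized (s : String) (out : Int) : Prop :=
  ¬ D_findRankOptimized s → out = findRankOptimized_alt s
instance (s : String) (out : Int) : Decidable (Spec_findRankOptimized s out) := by
  unfold Spec_findRankOptimized; infer_instance

def pvDiffWitness_findRankOptimized : String := "a`b"
def pvDiffWitnessOut_findRankOptimized : Int × Int := (0, 3)

-- ===== CLAIM (what is proved, stated in full; the proofs are below) =====
def Claim_unchanged_findRankOptimized : Prop :=
  ∀ (s : String), Dom_findRankOptimized s → Pre_findRankOptimized s →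
    Spec_findRankOptimized s (findRankOptimized s)

def Claim_changed_findRankOptimized : Prop :=
  Dom_findRankOptimized (pvDiffWitness_findRankOptimized) ∧
  Pre_findRankOptimized (pvDiffWitness_findRankOptimized) ∧
  D_findRankOptimized (pvDiffWitness_findRankOptimized) ∧
  findRankOptimized (pvDiffWitness_findRankOptimized) = pvDiffWitnessOut_findRankOptimized.1 ∧
  findRankOptimized_alt (pvDiffWitness_findRankOptimized) = pvDiffWitnessOut_findRankOptimized.2 ∧
  pvDiffWitnessOut_findRankOptimized.1 ≠ pvDiffWitnessOut_findRankOptimized.2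

-- ===== LEMMAS AND PROOFS =====

-- The common mathematical value: rank minus one, computed suffix by suffix.
def rankTail : List Char → Int
  | [] => 0
  | c :: t => (t.countP (fun d => decide (d < c)) : Int) * (t.length.factorial : Int) + rankTail t

-- all-lowercase predicate on the list side
def lowChars (t : List Char) : Prop := ∀ c ∈ t, 97 ≤ c.toNat ∧ c.toNat ≤ 122

-- invariant carried through A's main loop: cnt is the cumulative character count of t
def countInv (t : List Char) (cnt : List Int) : Prop :=
  cnt.length = 26 ∧
  ∀ m : Nat, m < 26 →
    PySem.List.pyGetD cnt (m : Int) 0 =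
      (t.countP (fun c => decide (c.toNat ≤ m + 97)) : Int)

-- A's main-loop body as a function of the enumerated pair
def gStep (N : Nat) (st : Int × Int × List Int) (p : Int × Char) : Int × Int × List Int :=
  let mul := PySem.Int.floordiv st.1 ((N : Int) - p.1)
  let charIndex : Int := ((p.2.toNat : Int)) - 97
  let rank := if charIndex > 0
    then st.2.1 + PySem.List.pyGetD st.2.2 (charIndex - 1) 0 * mul
    else st.2.1
  let cnt := (PySem.List.pyRange charIndex 26 1).foldl
    (fun c j => PySem.List.pySetD c j (PySem.List.pyGetD c j 0 - 1)) st.2.2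
  (mul, rank, cnt)

theorem char_lt_iff (a b : Char) : a < b ↔ a.toNat < b.toNat := Iff.rfl

theorem foldl_length_eq {β : Type} (F : List Int → β → List Int)
    (h : ∀ cnt b, (F cnt b).length = cnt.length) :
    ∀ (l : List β) (cnt : List Int), (l.foldl F cnt).length = cnt.length := by
  intro l
  induction l with
  | nil => intro cnt; rfl
  | cons b l ih => intro cnt; rw [List.foldl_cons, ih, h]

theorem factB_natCast (m : Nat) : factB (m : Int) = (m.factorial : Int) := by
  induction m with
  | zero => rw [factB]; norm_num [Nat.factorial]
  | succ k ih =>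
    rw [factB]
    by_cases hk : k = 0
    · subst hk; norm_num [Nat.factorial]
    · have h1 : ¬ ((k + 1 : Nat) : Int) ≤ 1 := by push_cast; omega
      rw [if_neg h1]
      have h2 : ((k + 1 : Nat) : Int) - 1 = (k : Int) := by push_cast; ring
      rw [h2, ih, Nat.factorial_succ]
      push_cast; ring

theorem factA_natCast (m : Nat) : factA (m : Int) = (m.factorial : Int) := by
  induction m with
  | zero =>
    unfold factA
    rw [PySem.List.pyRange_one_eq_nil (by norm_num)]
    norm_num [Nat.factorial]
  | succ k ih =>
    by_cases hk : k = 0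
    · subst hk
      unfold factA
      rw [show ((1 : Nat) : Int) + 1 = 2 by norm_num,
        PySem.List.pyRange_one_eq_nil (by norm_num)]
      norm_num [Nat.factorial]
    · unfold factA at ih ⊢
      rw [show ((k + 1 : Nat) : Int) + 1 = ((k : Int) + 1) + 1 by push_cast; ring,
        PySem.List.pyRange_one_succ_right (by omega), List.foldl_append, ih,
        Nat.factorial_succ]
      simp only [List.foldl_cons, List.foldl_nil]
      push_cast; ring

-- ===== B-side: the suffix-scan loop computes rankTail =====

theorem altLoop (cs : List Char) :
    ∀ (d k : Nat), cs.length - k = d → k ≤ cs.length → ∀ (r : Int),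
    (PySem.List.pyRange (k : Int) (cs.length : Int) 1).foldl
      (fun rank i =>
        rank + ((PySem.List.pyRange (i + 1) (cs.length : Int) 1).foldl
          (fun sm j =>
            if PySem.List.pyGetD cs j ' ' < PySem.List.pyGetD cs i ' ' then sm + 1 else sm)
          (0 : Int)) * factB ((cs.length : Int) - 1 - i)) r
      = r + rankTail (cs.drop k) := by
  intro d
  induction d with
  | zero =>
    intro k hd hk r
    have hkl : k = cs.length := by omega
    subst hkl
    rw [PySem.List.pyRange_one_eq_nil (le_refl _), List.foldl_nil, List.drop_length]
    simp [rankTail]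
  | succ d ih =>
    intro k hd hk r
    have hklt : k < cs.length := by omega
    rw [PySem.List.pyRange_one_cons (by exact_mod_cast hklt), List.foldl_cons]
    have hcast : ((k : Int) + 1) = ((k + 1 : Nat) : Int) := by push_cast; ring
    have hinner :
        (PySem.List.pyRange ((k : Int) + 1) (cs.length : Int) 1).foldl
          (fun sm j =>
            if PySem.List.pyGetD cs j ' ' < PySem.List.pyGetD cs (k : Int) ' ' then sm + 1 else sm)
          (0 : Int)
        = ((cs.drop (k + 1)).countP (fun x => decide (x < cs[k]'hklt)) : Int) := by
      rw [hcast]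
      rw [PySem.List.foldl_pyRange_pyGetD' cs ' '
        (fun sm x => if x < PySem.List.pyGetD cs (k : Int) ' ' then sm + 1 else sm) 0
        (by positivity)]
      rw [show ((k + 1 : Nat) : Int).toNat = k + 1 by omega]
      rw [PySem.List.foldl_ite_add_one (fun x => x < PySem.List.pyGetD cs (k : Int) ' ')]
      rw [PySem.List.pyGetD_natCast, List.getD_eq_getElem cs ' ' hklt]
      norm_num
    rw [hinner]
    have hfac : factB ((cs.length : Int) - 1 - (k : Int))
        = ((cs.length - k - 1).factorial : Int) := by
      rw [show (cs.length : Int) - 1 - (k : Int) = ((cs.length - k - 1 : Nat) : Int) by omega]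
      exact factB_natCast _
    rw [hfac, hcast, ih (k + 1) (by omega) (by omega)]
    rw [List.drop_eq_getElem_cons hklt, rankTail]
    rw [List.length_drop]
    have hE : cs.length - (1 + k) = cs.length - k - 1 := by omega
    have hE2 : cs.length - (k + 1) = cs.length - k - 1 := by omega
    rw [hE2]
    try rw [hE]
    ring

theorem alt_eq_rankTail (s : String) :
    findRankOptimized_alt s = 1 + rankTail s.toList := by
  unfold findRankOptimized_alt
  simp only [PySem.List.len_eq]
  have := altLoop s.toList s.toList.length 0 (by omega) (by omega) 1
  simpa using this

-- ===== A-side phase 1: building the frequency array =====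

def step1 (cnt : List Int) (c : Char) : List Int :=
  PySem.List.pySetD cnt ((c.toNat : Int) - 97)
    (PySem.List.pyGetD cnt ((c.toNat : Int) - 97) 0 + 1)

theorem step1_length (cnt : List Int) (c : Char) : (step1 cnt c).length = cnt.length :=
  PySem.List.length_pySetD ..

theorem build_count (cs : List Char) :
    ∀ (cnt : List Int), cnt.length = 26 → lowChars cs → ∀ m : Nat, m < 26 →
    PySem.List.pyGetD (cs.foldl step1 cnt) (m : Int) 0
      = PySem.List.pyGetD cnt (m : Int) 0
        + (cs.countP (fun c => decide (c.toNat = m + 97)) : Int) := by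
  induction cs with
  | nil => intro cnt _ _ m _; simp
  | cons c cs ih =>
    intro cnt hlen hlow m hm
    have hc := hlow c (by simp)
    have hidx : ((c.toNat : Int) - 97) = ((c.toNat - 97 : Nat) : Int) := by omega
    have hlt : c.toNat - 97 < cnt.length := by omega
    rw [List.foldl_cons, ih (step1 cnt c) (by rw [step1_length, hlen])
      (fun d hd => hlow d (by simp [hd])) m hm]
    unfold step1
    rw [hidx, PySem.List.pyGetD_pySetD_natCast cnt (c.toNat - 97) m _ 0 hlt]
    rw [List.countP_cons]
    by_cases he : c.toNat = m + 97
    · rw [if_pos (by omega), if_pos (by simpa using he)]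
      have hEq : c.toNat - 97 = m := by omega
      rw [hEq]
      push_cast; ring
    · rw [if_neg (by omega), if_neg (by simpa using he)]
      push_cast; ring

-- ===== A-side phase 2: cumulative sums =====

def step2 (cnt : List Int) (i : Int) : List Int :=
  PySem.List.pySetD cnt i (PySem.List.pyGetD cnt i 0 + PySem.List.pyGetD cnt (i - 1) 0)

theorem step2_length (cnt : List Int) (i : Int) : (step2 cnt i).length = cnt.length :=
  PySem.List.length_pySetD ..

theorem cum_count :
    ∀ (b : Nat), b ≤ 26 → ∀ (cnt : List Int), cnt.length = 26 → ∀ m : Nat, m < 26 →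
    PySem.List.pyGetD ((PySem.List.pyRange 1 (b : Int) 1).foldl step2 cnt) (m : Int) 0
      = if m < b
        then ((List.range (m + 1)).map (fun (j : Nat) => PySem.List.pyGetD cnt (j : Int) 0)).sum
        else PySem.List.pyGetD cnt (m : Int) 0 := by
  intro b
  induction b with
  | zero =>
    intro _ cnt _ m _
    rw [PySem.List.pyRange_one_eq_nil (by norm_num), List.foldl_nil, if_neg (by omega)]
  | succ b ih =>
    intro hb cnt hlen m hm
    by_cases hb0 : b = 0
    · subst hb0
      rw [show ((1 : Nat) : Int) = 1 by norm_num, PySem.List.pyRange_one_eq_nil (le_refl _),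
        List.foldl_nil]
      by_cases hm0 : m = 0
      · subst hm0
        simp [PySem.List.pyGetD_zero, List.getD]
      · rw [if_neg (by omega)]
    · have hlenG : ((PySem.List.pyRange 1 (b : Int) 1).foldl step2 cnt).length = 26 := by
        rw [foldl_length_eq step2 step2_length, hlen]
      rw [show ((b + 1 : Nat) : Int) = (b : Int) + 1 by push_cast; ring,
        PySem.List.pyRange_one_succ_right (by exact_mod_cast Nat.one_le_iff_ne_zero.mpr hb0),
        List.foldl_append, List.foldl_cons, List.foldl_nil]
      have hs2 : ∀ (X : List Int) (i : Int), step2 X i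
          = PySem.List.pySetD X i (PySem.List.pyGetD X i 0 + PySem.List.pyGetD X (i - 1) 0) :=
        fun _ _ => rfl
      rw [hs2]
      have hvb : PySem.List.pyGetD ((PySem.List.pyRange 1 (b : Int) 1).foldl step2 cnt) (b : Int) 0
          = PySem.List.pyGetD cnt (b : Int) 0 := by
        rw [ih (by omega) cnt hlen b (by omega), if_neg (by omega)]
      have hvb1 : PySem.List.pyGetD ((PySem.List.pyRange 1 (b : Int) 1).foldl step2 cnt)
            ((b : Int) - 1) 0
          = ((List.range b).map (fun (j : Nat) => PySem.List.pyGetD cnt (j : Int) 0)).sum := by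
        rw [show (b : Int) - 1 = ((b - 1 : Nat) : Int) by omega,
          ih (by omega) cnt hlen (b - 1) (by omega), if_pos (by omega),
          show b - 1 + 1 = b by omega]
      rw [hvb, hvb1, PySem.List.pyGetD_pySetD_natCast _ b m _ 0 (by omega)]
      by_cases hmb : m = b
      · subst hmb
        rw [if_pos rfl, if_pos (by omega), List.range_succ, List.map_append, List.sum_append]
        simp
        ring
      · rw [if_neg hmb, ih (by omega) cnt hlen m hm]
        by_cases hmlt : m < b
        · rw [if_pos hmlt, if_pos (by omega)]
        · rw [if_neg hmlt, if_neg (by omega)]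

-- count of c.toNat ≤ v+1 splits into ≤ v plus = v+1
theorem countP_split (cs : List Char) (v : Nat) :
    cs.countP (fun c => decide (c.toNat ≤ v + 1))
      = cs.countP (fun c => decide (c.toNat ≤ v)) + cs.countP (fun c => decide (c.toNat = v + 1)) := by
  induction cs with
  | nil => rfl
  | cons c cs ih =>
    simp only [List.countP_cons, ih, decide_eq_true_eq]
    split_ifs <;> omega

theorem sum_counts (cs : List Char) (hlow : lowChars cs) :
    ∀ m : Nat,
    ((List.range (m + 1)).map
        (fun (j : Nat) => (cs.countP (fun c => decide (c.toNat = j + 97)) : Int))).sum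
      = (cs.countP (fun c => decide (c.toNat ≤ m + 97)) : Int) := by
  intro m
  induction m with
  | zero =>
    rw [show (0 : Nat) + 1 = 1 from rfl, List.range_one]
    simp only [List.map_cons, List.map_nil, List.sum_cons, List.sum_nil, add_zero]
    congr 1
    apply List.countP_congr
    intro c hc
    have := hlow c hc
    simp only [decide_eq_true_eq]
    constructor <;> intro h <;> omega
  | succ m ih =>
    rw [List.range_succ, List.map_append, List.sum_append, ih]
    simp only [List.map_cons, List.map_nil, List.sum_cons, List.sum_nil, add_zero]
    rw [show m + 1 + 97 = (m + 97) + 1 by omega, countP_split cs (m + 97)]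
    push_cast
    rw [show m + 97 + 1 = m + 1 + 97 by omega]

-- ===== A-side phase 3: the decrement loop =====

def step3 (cnt : List Int) (j : Int) : List Int :=
  PySem.List.pySetD cnt j (PySem.List.pyGetD cnt j 0 - 1)

theorem step3_length (cnt : List Int) (j : Int) : (step3 cnt j).length = cnt.length :=
  PySem.List.length_pySetD ..

theorem dec_count :
    ∀ (d a : Nat), 26 - a = d → ∀ (cnt : List Int), cnt.length = 26 → ∀ m : Nat, m < 26 →
    PySem.List.pyGetD ((PySem.List.pyRange (a : Int) 26 1).foldl step3 cnt) (m : Int) 0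
      = PySem.List.pyGetD cnt (m : Int) 0 - (if a ≤ m then 1 else 0) := by
  intro d
  induction d with
  | zero =>
    intro a hd cnt hlen m hm
    rw [PySem.List.pyRange_one_eq_nil (by exact_mod_cast by omega : (26 : Int) ≤ (a : Int)),
      List.foldl_nil, if_neg (by omega)]
    ring
  | succ d ih =>
    intro a hd cnt hlen m hm
    have ha : a < 26 := by omega
    rw [PySem.List.pyRange_one_cons (by exact_mod_cast ha), List.foldl_cons,
      show (a : Int) + 1 = ((a + 1 : Nat) : Int) by push_cast; ring]
    rw [ih (a + 1) (by omega) (step3 cnt (a : Int)) (by rw [step3_length, hlen]) m hm]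
    unfold step3
    rw [PySem.List.pyGetD_pySetD_natCast cnt a m _ 0 (by omega)]
    by_cases hma : m = a
    · subst hma
      rw [if_pos rfl, if_neg (by omega), if_pos (le_refl _)]
      ring
    · rw [if_neg hma]
      by_cases hle : a ≤ m
      · rw [if_pos (by omega), if_pos hle]
      · rw [if_neg (by omega), if_neg hle]

theorem dec_length (a : Int) (cnt : List Int) :
    ((PySem.List.pyRange a 26 1).foldl step3 cnt).length = cnt.length :=
  foldl_length_eq step3 step3_length _ cnt

-- ===== A-side main loop =====

theorem mainLoop (N : Nat) :
    ∀ (t : List Char), ∀ (k : Nat), k + t.length = N → lowChars t →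
    ∀ (r : Int) (cnt : List Int), countInv t cnt →
    ((PySem.List.enumerate t (k : Int)).foldl (gStep N)
        ((t.length.factorial : Int), r, cnt)).2.1 = r + rankTail t := by
  intro t
  induction t with
  | nil =>
    intro k _ _ r cnt _
    rw [show PySem.List.enumerate ([] : List Char) (k : Int) = [] from rfl, List.foldl_nil]
    show r = r + rankTail []
    rw [show rankTail [] = 0 from rfl]
    ring
  | cons c t ih =>
    intro k hk hlow r cnt hinv
    simp only [List.length_cons] at hk
    obtain ⟨hlen, hcnt⟩ := hinv
    have hc := hlow c (by simp)
    rw [PySem.List.enumerate_cons, List.foldl_cons]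
    have hmul : PySem.Int.floordiv (((c :: t).length.factorial : Int)) ((N : Int) - (k : Int))
        = (t.length.factorial : Int) := by
      rw [List.length_cons, show (N : Int) - (k : Int) = ((t.length + 1 : Nat) : Int) by push_cast; omega]
      rw [PySem.Int.floordiv_eq_ediv_of_pos (by positivity)]
      rw [Nat.factorial_succ]
      push_cast
      rw [Int.mul_ediv_cancel_left _ (by positivity)]
    have hsmaller :
        (if ((c.toNat : Int) - 97) > 0
          then r + PySem.List.pyGetD cnt (((c.toNat : Int) - 97) - 1) 0 * (t.length.factorial : Int)
          else r)
        = r + (t.countP (fun d => decide (d < c)) : Int) * (t.length.factorial : Int) := by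
      by_cases h97 : c.toNat = 97
      · rw [if_neg (by omega)]
        have : t.countP (fun d => decide (d < c)) = 0 := by
          rw [List.countP_eq_zero]
          intro d hd
          have := hlow d (by simp [hd])
          simp only [decide_eq_true_eq, char_lt_iff]
          omega
        rw [this]
        push_cast; ring
      · have h98 : 98 ≤ c.toNat := by omega
        rw [if_pos (by omega),
          show ((c.toNat : Int) - 97) - 1 = ((c.toNat - 98 : Nat) : Int) by omega,
          hcnt (c.toNat - 98) (by omega)]
        congr 2
        rw [List.countP_cons, if_neg (by simp only [decide_eq_true_eq]; omega)]
        rw [Nat.cast_inj]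
        apply List.countP_congr
        intro d hd
        have := hlow d (List.mem_cons_of_mem c hd)
        simp only [decide_eq_true_eq, char_lt_iff]
        constructor <;> intro h <;> omega
    have hinv' : countInv t ((PySem.List.pyRange ((c.toNat : Int) - 97) 26 1).foldl
        (fun cc j => PySem.List.pySetD cc j (PySem.List.pyGetD cc j 0 - 1)) cnt) := by
      have hstep : (fun (cc : List Int) (j : Int) =>
          PySem.List.pySetD cc j (PySem.List.pyGetD cc j 0 - 1)) = step3 := by
        funext cc j; rfl
      rw [hstep]
      constructor
      · rw [show ((c.toNat : Int) - 97) = ((c.toNat - 97 : Nat) : Int) by omega,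
          dec_length, hlen]
      · intro m hm
        rw [show ((c.toNat : Int) - 97) = ((c.toNat - 97 : Nat) : Int) by omega,
          dec_count (26 - (c.toNat - 97)) (c.toNat - 97) rfl cnt hlen m hm,
          hcnt m hm, List.countP_cons]
        by_cases hle : c.toNat ≤ m + 97
        · rw [if_pos (by simpa using hle), if_pos (by omega)]
          push_cast; ring
        · rw [if_neg (by simpa using hle), if_neg (by omega)]
          push_cast; ring
    have hg : gStep N (((c :: t).length.factorial : Int), r, cnt) ((k : Int), c)
        = ((t.length.factorial : Int),
           r + (t.countP (fun d => decide (d < c)) : Int) * (t.length.factorial : Int),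
           (PySem.List.pyRange ((c.toNat : Int) - 97) 26 1).foldl
             (fun cc j => PySem.List.pySetD cc j (PySem.List.pyGetD cc j 0 - 1)) cnt) := by
      simp only [gStep]
      rw [hmul, hsmaller]
    rw [hg]
    have happ := ih (k + 1) (by omega)
      (fun d hd => hlow d (List.mem_cons_of_mem c hd))
      (r + (t.countP (fun d => decide (d < c)) : Int) * (t.length.factorial : Int))
      ((PySem.List.pyRange ((c.toNat : Int) - 97) 26 1).foldl
        (fun cc j => PySem.List.pySetD cc j (PySem.List.pyGetD cc j 0 - 1)) cnt)
      hinv'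
    rw [show (k : Int) + 1 = ((k + 1 : Nat) : Int) by push_cast; ring, happ]
    show _ = r + ((t.countP (fun d => decide (d < c)) : Int) * (t.length.factorial : Int)
      + rankTail t)
    ring

-- fold over indices with lookups = fold over the enumerated pairs (specific shape of A's loop)
theorem enumFold (cs : List Char) (N : Nat) :
    ∀ (l : List Int) (init : Int × Int × List Int),
    l.foldl (fun st i => gStep N st (i, PySem.List.pyGetD cs i ' ')) init
      = (l.map (fun j => (j, PySem.List.pyGetD cs j ' '))).foldl (gStep N) init := by
  intro l
  induction l with
  | nil => intro init; rfl
  | cons x l ihl => intro init; rw [List.foldl_cons, List.map_cons, List.foldl_cons, ihl]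

-- A's whole pipeline, fully applied (definitionally the body of the port)
theorem a_pipeline (cs : List Char) (hlow : lowChars cs) :
    ((PySem.List.pyRange 0 (PySem.List.len cs) 1).foldl
      (fun (st : Int × Int × List Int) i =>
        let mul := PySem.Int.floordiv st.1 (PySem.List.len cs - i)
        let charIndex : Int := ((PySem.List.pyGetD cs i ' ').toNat : Int) - 97
        let rank := if charIndex > 0
          then st.2.1 + PySem.List.pyGetD st.2.2 (charIndex - 1) 0 * mul
          else st.2.1
        let cnt := (PySem.List.pyRange charIndex 26 1).foldl
          (fun c j => PySem.List.pySetD c j (PySem.List.pyGetD c j 0 - 1)) st.2.2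
        (mul, rank, cnt))
      (factA (PySem.List.len cs), 1,
        (PySem.List.pyRange 1 26 1).foldl
          (fun cnt i =>
            PySem.List.pySetD cnt i
              (PySem.List.pyGetD cnt i 0 + PySem.List.pyGetD cnt (i - 1) 0))
          ((PySem.List.pyRange 0 (PySem.List.len cs) 1).foldl
            (fun cnt i =>
              let ci : Int := ((PySem.List.pyGetD cs i ' ').toNat : Int) - 97
              PySem.List.pySetD cnt ci (PySem.List.pyGetD cnt ci 0 + 1))
            (List.replicate 26 0)))).2.1
    = 1 + rankTail cs := by
  have e1 : (fun (cnt : List Int) (i : Int) =>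
      let ci : Int := ((PySem.List.pyGetD cs i ' ').toNat : Int) - 97
      PySem.List.pySetD cnt ci (PySem.List.pyGetD cnt ci 0 + 1))
      = (fun acc i => step1 acc (PySem.List.pyGetD cs i ' ')) := rfl
  have e2 : (fun (cnt : List Int) (i : Int) =>
      PySem.List.pySetD cnt i
        (PySem.List.pyGetD cnt i 0 + PySem.List.pyGetD cnt (i - 1) 0)) = step2 := rfl
  have e3 : (fun (st : Int × Int × List Int) (i : Int) =>
      let mul := PySem.Int.floordiv st.1 (PySem.List.len cs - i)
      let charIndex : Int := ((PySem.List.pyGetD cs i ' ').toNat : Int) - 97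
      let rank := if charIndex > 0
        then st.2.1 + PySem.List.pyGetD st.2.2 (charIndex - 1) 0 * mul
        else st.2.1
      let cnt := (PySem.List.pyRange charIndex 26 1).foldl
        (fun c j => PySem.List.pySetD c j (PySem.List.pyGetD c j 0 - 1)) st.2.2
      (mul, rank, cnt))
      = (fun st i => gStep cs.length st (i, PySem.List.pyGetD cs i ' ')) := by
    funext st i
    simp only [gStep, PySem.List.len_eq]
  rw [e1, e2, e3]
  rw [PySem.List.foldl_pyRange_zero_pyGetD cs ' ' step1 (List.replicate 26 0)]
  set C1 := cs.foldl step1 (List.replicate 26 0) with hC1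
  have hlen1 : C1.length = 26 := by
    rw [hC1, foldl_length_eq step1 step1_length, List.length_replicate]
  have hInv1 : ∀ m : Nat, m < 26 →
      PySem.List.pyGetD C1 (m : Int) 0
        = (cs.countP (fun c => decide (c.toNat = m + 97)) : Int) := by
    intro m hm
    rw [hC1, build_count cs (List.replicate 26 0) (by simp) hlow m hm,
      PySem.List.pyGetD_natCast, List.getD_eq_getElem _ _ (by simpa using hm),
      List.getElem_replicate]
    ring
  set C2 := (PySem.List.pyRange 1 26 1).foldl step2 C1 with hC2
  have hInv2 : countInv cs C2 := by
    constructor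
    · rw [hC2, foldl_length_eq step2 step2_length, hlen1]
    · intro m hm
      rw [hC2, show (26 : Int) = ((26 : Nat) : Int) by norm_num,
        cum_count 26 (le_refl _) C1 hlen1 m hm, if_pos hm]
      rw [List.map_congr_left (fun (j : Nat) hj => hInv1 j (by
        simp only [List.mem_range] at hj; omega))]
      exact sum_counts cs hlow m
  have hfa : factA (PySem.List.len cs) = (cs.length.factorial : Int) := by
    rw [PySem.List.len_eq]; exact factA_natCast cs.length
  rw [hfa]
  have he := PySem.List.enumerate_eq_map_pyRange cs ' '
  rw [enumFold cs cs.length (PySem.List.pyRange 0 (PySem.List.len cs) 1)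
      ((cs.length.factorial : Int), 1, C2), ← he]
  exact mainLoop cs.length cs 0 (by omega) hlow 1 C2 hInv2

theorem a_eq_rankTail (s : String) (hlow : lowChars s.toList) :
    findRankOptimized s = 1 + rankTail s.toList :=
  a_pipeline s.toList hlow

-- A's pipeline on a short string of characters below 'a': charIndex ≤ 0, so rank stays 1
theorem a_small_pipeline (cs : List Char) :
    cs.length ≤ 1 → (∀ c ∈ cs, c.toNat ≤ 96) →
    ((PySem.List.pyRange 0 (PySem.List.len cs) 1).foldl
      (fun (st : Int × Int × List Int) i =>
        let mul := PySem.Int.floordiv st.1 (PySem.List.len cs - i)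
        let charIndex : Int := ((PySem.List.pyGetD cs i ' ').toNat : Int) - 97
        let rank := if charIndex > 0
          then st.2.1 + PySem.List.pyGetD st.2.2 (charIndex - 1) 0 * mul
          else st.2.1
        let cnt := (PySem.List.pyRange charIndex 26 1).foldl
          (fun c j => PySem.List.pySetD c j (PySem.List.pyGetD c j 0 - 1)) st.2.2
        (mul, rank, cnt))
      (factA (PySem.List.len cs), 1,
        (PySem.List.pyRange 1 26 1).foldl
          (fun cnt i =>
            PySem.List.pySetD cnt i
              (PySem.List.pyGetD cnt i 0 + PySem.List.pyGetD cnt (i - 1) 0))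
          ((PySem.List.pyRange 0 (PySem.List.len cs) 1).foldl
            (fun cnt i =>
              let ci : Int := ((PySem.List.pyGetD cs i ' ').toNat : Int) - 97
              PySem.List.pySetD cnt ci (PySem.List.pyGetD cnt ci 0 + 1))
            (List.replicate 26 0)))).2.1
    = 1 := by
  match cs with
  | [] => intro _ _; rfl
  | [c] =>
    intro _ hcs
    have hc := hcs c (by simp)
    simp only [show PySem.List.len [c] = 1 from rfl,
      show PySem.List.pyRange 0 1 1 = [(0 : Int)] from rfl, List.foldl_cons, List.foldl_nil,
      show PySem.List.pyGetD [c] (0 : Int) ' ' = c from rfl]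
    rw [if_neg (by omega : ¬ ((c.toNat : Int) - 97 > 0))]
  | _ :: _ :: _ => intro h _; simp at h

-- A on the empty or one-bad-character string, through the pipeline
theorem a_small (s : String) (hlen : s.toList.length ≤ 1)
    (hcs : ∀ c ∈ s.toList, c.toNat ≤ 96) : findRankOptimized s = 1 :=
  a_small_pipeline s.toList hlen hcs

-- B on the empty string and on a single character
theorem b_small (s : String) (h : s.toList = [] ∨ ∃ c, s.toList = [c]) :
    findRankOptimized_alt s = 1 := by
  rw [alt_eq_rankTail s]
  rcases h with h | ⟨c, h⟩ <;> rw [h]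
  · rfl
  · show (1 : Int) + (([] : List Char).countP (fun d => decide (d < c)) * ↑(List.length ([] : List Char)).factorial + rankTail []) = 1
    rw [show rankTail [] = 0 from rfl]
    simp

-- ===== VERDICT (by name: the statement is the Claim_ definition above) =====
theorem findRankOptimized_spec : Claim_unchanged_findRankOptimized := by
  intro s _ hpre
  unfold Spec_findRankOptimized
  intro hnd
  by_cases hall : ∀ c ∈ s.toList, 97 ≤ c.toNat
  · have hlow : lowChars s.toList := by
      intro c hc
      have h1 := List.all_eq_true.mp hpre c hc
      simp only [Bool.and_eq_true, decide_eq_true_eq] at h1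
      exact ⟨hall c hc, h1.2⟩
    rw [a_eq_rankTail s hlow, alt_eq_rankTail s]
  · push_neg at hall
    obtain ⟨c, hc, hclt⟩ := hall
    have hany : (s.toList.any (fun c => c.toNat ≤ 96)) = true :=
      List.any_eq_true.mpr ⟨c, hc, by simp only [decide_eq_true_eq]; omega⟩
    have hshort : s.toList.length ≤ 1 := by
      by_contra hlen
      exact hnd ⟨by omega, hany⟩
    match hl : s.toList with
    | [] => rw [a_small s (by rw [hl]; simp) (by rw [hl]; simp), b_small s (Or.inl hl)]
    | [d] =>
      have hd : d.toNat ≤ 96 := by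
        rw [hl] at hc
        rcases List.mem_singleton.mp hc with rfl
        omega
      rw [a_small s (by rw [hl]; simp) (by rw [hl]; simpa using hd),
        b_small s (Or.inr ⟨d, hl⟩)]
    | _ :: _ :: _ => rw [hl] at hshort; simp at hshort

set_option maxRecDepth 100000 in
theorem findRankOptimized_changed : Claim_changed_findRankOptimized := by
  unfold Claim_changed_findRankOptimized
  refine ⟨by decide, by decide, by decide, by decide, ?_, by decide⟩
  rw [alt_eq_rankTail]
  decide
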